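-- pv_equiv track=rewrite | github.com/bioinfowenz/AbnumPro | AbnumPro_source_code/num/schemes.py | get_imgt_cdr
-- ===== SOURCE A (Python) =====
-- alphabet = ["A", "B", "C", "D", "E", "F", "G", "H", "I", "J", "K", "L", "M", "N", "O", "P", "Q", "R", "S", "T", "U", "V", "W", "X", "Y", "Z", "AA", "BB", "CC", "DD", "EE", "FF", "GG", "HH", "II", "JJ", "KK", "LL", "MM", "NN", "OO", "PP", "QQ", "RR", "SS", "TT", "UU", "VV", "WW", "XX", "YY", "ZZ", " "]
--
-- def get_imgt_cdr(length, maxlength, start, end):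
--
--     annotations = [ None for _ in range(max(length, maxlength)) ]
--
--     if length == 0:
--         return annotations
--     elif length == 1:
--         annotations[0] = (start, ' ')
--         return annotations
--
--     front, back = 0, -1
--
--
--     az = alphabet[:-1]
--     za = az[::-1]
--
--     for i in range(min(length, maxlength)):
--         if i % 2:
--             annotations[back] = (end + back, " ")
--             back -= 1
--         else:
--             annotations[front] = (start + front, " ")
--             front += 1
--
--
--     centrepoint = [ i for i,v in enumerate(annotations) if v == None ]
--     if not centrepoint:
--         return annotations
--
--     centre_left  = annotations[min(centrepoint)-1][0] # Get the index right before the first None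
--     centre_right = annotations[max(centrepoint)+1][0] # Get the index right after  the first None
--
--
--     if not maxlength % 2:
--         frontfactor, backfactor = maxlength//2, maxlength//2
--
--     else:
--         frontfactor, backfactor = (maxlength//2)+1, maxlength//2
--
--     for i in range(max(0, length-maxlength)):
--         if not i % 2:
--             annotations[back] = (centre_right, za[back + backfactor])
--             back -= 1
--         else:
--             annotations[front] = (centre_left, az[front - frontfactor])
--             front += 1
--
--     return annotations
-- ===== SOURCE B (Python) =====
-- def _label(i):
--     c = chr(ord('A') + i % 26)
--     return c if i < 26 else c + c
--
-- def get_imgt_cdr(length, maxlength, start, end):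
--     size = max(length, maxlength, 0)
--     if length <= 0:
--         return [None] * size
--     if length == 1:
--         return [(start, ' ')] + [None] * (size - 1)
--     k = min(length, maxlength)
--     fc = (k + 1) // 2          # front ' '-annotated cells
--     bc = k // 2                # back ' '-annotated cells
--     d = length - maxlength     # labelled interior cells (when positive)
--     def cell(j):
--         if j < fc:
--             return (start + j, ' ')
--         if j >= size - bc:
--             return (end - (size - j), ' ')
--         if d <= 0:
--             return None
--         if j < fc + d // 2:
--             return (start + fc - 1, _label(j - fc))
--         return (end - bc, _label(size - bc - 1 - j))
--     return [cell(j) for j in range(size)]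
-- ===== Notes on version B (the rewrite author's own statement) =====
-- stated objective: simpler
-- what changed: B replaces A's two alternating front/back pointer loops, the centrepoint None-scan and the alphabet table by a single pass that computes every output cell directly from closed-form index arithmetic (front/back counts ceil/floor(min(length,maxlength)/2), centre values derived arithmetically, labels computed from character codes).
import Mathlib
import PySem

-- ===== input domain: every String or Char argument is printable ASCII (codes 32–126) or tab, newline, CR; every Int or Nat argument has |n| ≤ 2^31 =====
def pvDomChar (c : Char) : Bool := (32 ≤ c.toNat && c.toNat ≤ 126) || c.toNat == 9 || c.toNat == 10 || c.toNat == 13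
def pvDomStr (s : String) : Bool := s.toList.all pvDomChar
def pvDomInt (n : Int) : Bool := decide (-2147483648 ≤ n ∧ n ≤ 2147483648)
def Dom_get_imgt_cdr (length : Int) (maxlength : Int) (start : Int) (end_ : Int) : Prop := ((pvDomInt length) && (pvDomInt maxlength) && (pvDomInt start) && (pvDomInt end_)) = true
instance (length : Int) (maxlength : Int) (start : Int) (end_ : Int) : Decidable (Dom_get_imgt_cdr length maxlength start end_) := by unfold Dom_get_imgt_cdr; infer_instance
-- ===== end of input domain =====

-- B builds the annotation array in one closed-form pass instead of A's two alternating
-- front/back pointer loops, centrepoint scan and alphabet table (objective: simpler).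

-- ===== PORT A =====
def pvAlphabet : List String := ["A", "B", "C", "D", "E", "F", "G", "H", "I", "J", "K", "L", "M", "N", "O", "P", "Q", "R", "S", "T", "U", "V", "W", "X", "Y", "Z", "AA", "BB", "CC", "DD", "EE", "FF", "GG", "HH", "II", "JJ", "KK", "LL", "MM", "NN", "OO", "PP", "QQ", "RR", "SS", "TT", "UU", "VV", "WW", "XX", "YY", "ZZ", " "]

-- body of A's first for-loop (state = (annotations, front, back))
def pvStep1 (start end_ : Int) (st : List (Option (Int × String)) × Int × Int) (i : Int) :
    List (Option (Int × String)) × Int × Int :=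
  if PySem.Int.mod i 2 ≠ 0 then
    (PySem.List.pySetD st.1 st.2.2 (some (end_ + st.2.2, " ")), st.2.1, st.2.2 - 1)
  else
    (PySem.List.pySetD st.1 st.2.1 (some (start + st.2.1, " ")), st.2.1 + 1, st.2.2)

-- body of A's second for-loop; az[..]/za[..] out of range raise in Python (excluded by Pre_)
def pvStep2 (cl cr ff bf : Int) (az za : List String)
    (st : List (Option (Int × String)) × Int × Int) (i : Int) :
    List (Option (Int × String)) × Int × Int :=
  if PySem.Int.mod i 2 = 0 then
    (PySem.List.pySetD st.1 st.2.2 (some (cr, PySem.List.pyGetD za (st.2.2 + bf) "")), st.2.1, st.2.2 - 1)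
  else
    (PySem.List.pySetD st.1 st.2.1 (some (cl, PySem.List.pyGetD az (st.2.1 - ff) "")), st.2.1 + 1, st.2.2)

def get_imgt_cdr (length : Int) (maxlength : Int) (start : Int) (end_ : Int) : List (Option (Int × String)) :=
  let annotations := (PySem.List.pyRange 0 (max length maxlength) 1).map
    (fun _ => (none : Option (Int × String)))
  if length = 0 then annotations
  else if length = 1 then PySem.List.pySetD annotations 0 (some (start, " "))
  else
    let az := PySem.List.slice pvAlphabet none (some (-1))
    let za := (PySem.List.slice? az none none (-1)).getD []
    let st1 := (PySem.List.pyRange 0 (min length maxlength) 1).foldl (pvStep1 start end_)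
      (annotations, 0, -1)
    let centrepoint := (PySem.List.enumerate st1.1 0).filterMap
      (fun p => if p.2 = (none : Option (Int × String)) then some p.1 else none)
    if centrepoint = [] then st1.1
    else
      -- annotations[min(cp)-1][0]: a None here or an out-of-range index raises in Python (excluded by Pre_)
      let centre_left := match PySem.List.pyGet? st1.1 ((PySem.List.min? centrepoint (fun x => x)).getD 0 - 1) with
        | some (some p) => p.1
        | _ => 0
      let centre_right := match PySem.List.pyGet? st1.1 ((PySem.List.max? centrepoint (fun x => x)).getD 0 + 1) with
        | some (some p) => p.1
        | _ => 0
      let fb := if PySem.Int.mod maxlength 2 = 0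
        then (PySem.Int.floordiv maxlength 2, PySem.Int.floordiv maxlength 2)
        else (PySem.Int.floordiv maxlength 2 + 1, PySem.Int.floordiv maxlength 2)
      let st2 := (PySem.List.pyRange 0 (max 0 (length - maxlength)) 1).foldl
        (pvStep2 centre_left centre_right fb.1 fb.2 az za) (st1.1, st1.2.1, st1.2.2)
      st2.1

-- ===== PORT B =====
def pvLabel (i : Int) : String :=
  let c := Char.ofNat (65 + (PySem.Int.mod i 26).toNat)
  if i < 26 then String.ofList [c] else String.ofList [c, c]

-- Source B's nested `cell` helper
def pvCell (length maxlength start end_ : Int) (j : Int) : Option (Int × String) :=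
  let size := max (max length maxlength) 0
  let k := min length maxlength
  let fc := PySem.Int.floordiv (k + 1) 2
  let bc := PySem.Int.floordiv k 2
  let d := length - maxlength
  if j < fc then some (start + j, " ")
  else if size - bc ≤ j then some (end_ - (size - j), " ")
  else if d ≤ 0 then none
  else if j < fc + PySem.Int.floordiv d 2 then some (start + fc - 1, pvLabel (j - fc))
  else some (end_ - bc, pvLabel (size - bc - 1 - j))

def get_imgt_cdr_alt (length : Int) (maxlength : Int) (start : Int) (end_ : Int) : List (Option (Int × String)) :=
  let size := max (max length maxlength) 0
  if length ≤ 0 then List.replicate size.toNat none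
  else if length = 1 then some (start, " ") :: List.replicate (size - 1).toNat none
  else (PySem.List.pyRange 0 size 1).map (pvCell length maxlength start end_)

-- ===== PRECONDITION & SPEC =====
-- Pre_ excludes exactly the inputs on which A raises: with 2 ≤ length Python hits a
-- TypeError/IndexError around the centrepoint when maxlength ≤ 1, and an IndexError in
-- az/za when length - maxlength > 104; a negative length with maxlength ≥ 1 also raises.
def Pre_get_imgt_cdr (length : Int) (maxlength : Int) (start : Int) (end_ : Int) : Prop :=
  length = 0 ∨ length = 1 ∨ (length < 0 ∧ maxlength ≤ 0) ∨
    (2 ≤ length ∧ 2 ≤ maxlength ∧ length - maxlength ≤ 104)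
instance (length : Int) (maxlength : Int) (start : Int) (end_ : Int) : Decidable (Pre_get_imgt_cdr length maxlength start end_) := by unfold Pre_get_imgt_cdr; infer_instance
def pvWitness_get_imgt_cdr : Int × Int × Int × Int := (7, 5, 100, 500)

def Spec_get_imgt_cdr (length : Int) (maxlength : Int) (start : Int) (end_ : Int) (out : List (Option (Int × String))) : Prop := out = get_imgt_cdr_alt length maxlength start end_
instance (length : Int) (maxlength : Int) (start : Int) (end_ : Int) (out : List (Option (Int × String))) : Decidable (Spec_get_imgt_cdr length maxlength start end_ out) := by unfold Spec_get_imgt_cdr; infer_instance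

-- ===== CLAIM (what is proved, stated in full; the proofs are below) =====
def Claim_equal_get_imgt_cdr : Prop := ∀ (length : Int) (maxlength : Int) (start : Int) (end_ : Int), Dom_get_imgt_cdr length maxlength start end_ → Pre_get_imgt_cdr length maxlength start end_ → Spec_get_imgt_cdr length maxlength start end_ (get_imgt_cdr length maxlength start end_)

-- ===== LEMMAS AND PROOFS =====

-- proof-side segment descriptions of A's intermediate arrays
def pvFront (s : Int) (c : Nat) : List (Option (Int × String)) :=
  (List.range c).map (fun j : Nat => some ((s + (j:Int)), " "))
def pvBack (e : Int) (c : Nat) : List (Option (Int × String)) :=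
  (List.range c).map (fun u : Nat => some ((e - (c:Int) + (u:Int)), " "))
def pvAz : List String := pvAlphabet.dropLast
def pvAzAt (i : Nat) : String := pvAz.getD i ""
def pvLblF (cl : Int) (c : Nat) : List (Option (Int × String)) :=
  (List.range c).map (fun u : Nat => some (cl, pvAzAt u))
def pvLblB (cr : Int) (c : Nat) : List (Option (Int × String)) :=
  (List.range c).map (fun u : Nat => some (cr, pvAzAt (c - 1 - u)))

theorem pv_setD_neg {α : Type} (xs : List α) (i : Int) (v : α)
    (h1 : -(xs.length : Int) ≤ i) (h2 : i < 0) :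
    PySem.List.pySetD xs i v = xs.set ((xs.length : Int) + i).toNat v := by
  simp only [PySem.List.pySetD, PySem.List.pySet?, PySem.List.pyIdx?]
  rw [if_neg (by omega), if_pos (by omega)]
  simp only [Option.map_some, Option.getD_some]
  congr 1
  omega

theorem pv_map_const {α : Type} (n : Int) (c : α) :
    (PySem.List.pyRange 0 n 1).map (fun _ => c) = List.replicate n.toNat c := by
  rw [PySem.List.pyRange_one, List.map_map]
  have : ((fun _ : Int => c) ∘ fun k : Nat => ((0:Int) + (k:Int))) = fun _ => c := rfl
  rw [this, List.map_const', List.length_range, Int.sub_zero]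

theorem pv_set_append {α : Type} (F rest : List α) (v : α) :
    (F ++ rest).set F.length v = F ++ rest.set 0 v := by
  induction F with
  | nil => simp
  | cons x t ih => simp [ih]

theorem pv_set_at {α : Type} (F rest : List α) (idx : Nat) (v : α) (h : idx = F.length) :
    (F ++ rest).set idx v = F ++ rest.set 0 v := by
  subst h; exact pv_set_append F rest v

@[simp] theorem pvFront_length (s : Int) (c : Nat) : (pvFront s c).length = c := by
  simp [pvFront]
@[simp] theorem pvBack_length (e : Int) (c : Nat) : (pvBack e c).length = c := by
  simp [pvBack]
@[simp] theorem pvLblF_length (cl : Int) (c : Nat) : (pvLblF cl c).length = c := by simp [pvLblF]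
@[simp] theorem pvLblB_length (cr : Int) (c : Nat) : (pvLblB cr c).length = c := by simp [pvLblB]

theorem pvFront_succ (s : Int) (c : Nat) :
    pvFront s (c+1) = pvFront s c ++ [some ((s + (c:Int)), " ")] := by
  simp [pvFront, List.range_succ]

theorem pvBack_succ (e : Int) (c : Nat) :
    pvBack e (c+1) = some ((e - ((c:Int)+1)), " ") :: pvBack e c := by
  simp only [pvBack, List.range_succ_eq_map, List.map_cons, List.map_map]
  congr 1
  · congr 2
    push_cast
    ring
  · apply List.map_congr_left
    intro k _
    simp only [Function.comp_apply]
    congr 2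
    push_cast
    ring

theorem pvLblF_succ (cl : Int) (c : Nat) :
    pvLblF cl (c+1) = pvLblF cl c ++ [some (cl, pvAzAt c)] := by
  simp [pvLblF, List.range_succ]

theorem pvLblB_succ (cr : Int) (c : Nat) :
    pvLblB cr (c+1) = some (cr, pvAzAt c) :: pvLblB cr c := by
  simp only [pvLblB, List.range_succ_eq_map, List.map_cons, List.map_map]
  congr 1
  apply List.map_congr_left
  intro k _
  simp only [Function.comp_apply]
  congr 2
  congr 1
  omega

@[simp] theorem pvAz_length : pvAz.length = 52 := rfl

theorem pv_az_get (t : Nat) : PySem.List.pyGetD pvAz ((t:Int)) "" = pvAzAt t := by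
  simp [PySem.List.pyGetD_natCast, pvAzAt]

theorem pv_za_get (t : Nat) : PySem.List.pyGetD pvAz.reverse (-1 - (t:Int)) "" = pvAzAt t := by
  by_cases h : t < 52
  · have hc : (-1 - (t:Int)) = -(((t+1 : Nat)):Int) := by push_cast; ring
    rw [hc, PySem.List.pyGetD_neg_natCast _ _ _ (by omega) (by simp; omega)]
    rw [List.getElem_reverse]
    simp only [pvAz_length, List.length_reverse]
    rw [pvAzAt, List.getD_eq_getElem _ _ (by simp; omega)]
    congr 1
    omega
  · rw [PySem.List.pyGetD_of_none _ _ _ (by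
      rw [PySem.List.pyGet?_eq_none_iff]
      simp only [PySem.Raise.InRange, List.length_reverse, pvAz_length, not_and, not_lt]
      omega)]
    rw [pvAzAt, List.getD_eq_default _ _ (by simp; omega)]

theorem pv_loop1 (s e : Int) (n : Nat) : ∀ (k : Nat), k ≤ n →
    (PySem.List.pyRange 0 (k : Int) 1).foldl (pvStep1 s e)
      (List.replicate n (none : Option (Int × String)), 0, -1)
    = (pvFront s ((k+1)/2) ++ List.replicate (n-k) none ++ pvBack e (k/2),
       (((k+1)/2 : Nat) : Int), -1 - ((k/2 : Nat) : Int)) := by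
  intro k
  induction k with
  | zero =>
    intro _
    simp [pvFront, pvBack]
  | succ k ih =>
    intro hk
    have hcast : (((k+1:Nat)) : Int) = (k:Int) + 1 := by push_cast; ring
    rw [hcast, PySem.List.pyRange_one_succ_right (by omega), List.foldl_append,
      List.foldl_cons, List.foldl_nil, ih (by omega)]
    have hmod : PySem.Int.mod (k:Int) 2 = (k:Int) % 2 := PySem.Int.mod_eq_emod_of_pos (by omega)
    rcases Nat.even_or_odd k with he | ho
    · -- front write
      obtain ⟨c, rfl⟩ : ∃ c, k = c + c := he
      have hk2 : (c+c) % 2 = 0 := by omega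
      simp only [pvStep1, hmod]
      rw [if_neg (by omega)]
      rw [PySem.List.pySetD_of_nonneg _ _ (by positivity)]
      have h1 : (c+c+1)/2 = c := by omega
      have h2 : (c+c+1+1)/2 = c + 1 := by omega
      have h3 : (c+c)/2 = c := by omega
      have h4 : n - (c+c) = (n - (c+c+1)) + 1 := by omega
      simp only [Prod.mk.injEq]
      refine ⟨?_, by omega, by omega⟩
      rw [h1, h2, h3, h4, pvFront_succ, List.replicate_succ, Int.toNat_natCast,
        List.append_assoc, List.cons_append,
        pv_set_at _ _ _ _ (by simp)]
      simp [List.append_assoc]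
    · -- back write
      obtain ⟨c, rfl⟩ : ∃ c, k = 2*c + 1 := ho
      have hk2 : (2*c+1) % 2 = 1 := by omega
      simp only [pvStep1, hmod]
      rw [if_pos (by omega)]
      have h1 : (2*c+1+1)/2 = c + 1 := by omega
      have h2 : (2*c+1+1+1)/2 = c + 1 := by omega
      have h3 : (2*c+1)/2 = c := by omega
      have h4 : n - (2*c+1) = (n - (2*c+1+1)) + 1 := by omega
      have hlen : (pvFront s ((2*c+1+1)/2) ++ List.replicate (n-(2*c+1)) none ++ pvBack e ((2*c+1)/2)).length = n := by
        simp; omega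
      rw [pv_setD_neg _ _ _ (by rw [hlen]; push_cast; omega) (by push_cast; omega), hlen]
      simp only [Prod.mk.injEq]
      refine ⟨?_, by omega, by omega⟩
      rw [h1, h2, h3, h4, List.replicate_succ', pvBack_succ,
        show (pvFront s (c+1) ++ (List.replicate (n-(2*c+1+1)) none ++ [none]) ++ pvBack e c)
          = ((pvFront s (c+1) ++ List.replicate (n-(2*c+1+1)) none) ++ (none :: pvBack e c)) by
            simp [List.append_assoc],
        pv_set_at _ _ _ _ (by simp; omega)]
      simp only [List.set_cons_zero, List.append_assoc, List.cons_append]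
      congr 3
      ring

theorem pv_cp_some (xs : List (Option (Int × String))) : ∀ (t : Int), (∀ x ∈ xs, x ≠ none) →
    (PySem.List.enumerate xs t).filterMap
      (fun p => if p.2 = (none : Option (Int × String)) then some p.1 else none) = [] := by
  induction xs with
  | nil => intro t _; rfl
  | cons x xs ih =>
    intro t h
    rw [PySem.List.enumerate_cons, List.filterMap_cons]
    simp only [if_neg (h x (by simp))]
    exact ih (t+1) (fun z hz => h z (by simp [hz]))

theorem pv_cp_rep (r : Nat) : ∀ (t : Int),
    (PySem.List.enumerate (List.replicate r (none : Option (Int × String))) t).filterMap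
      (fun p => if p.2 = (none : Option (Int × String)) then some p.1 else none)
    = (List.range r).map (fun u : Nat => t + (u:Int)) := by
  induction r with
  | zero => intro t; rfl
  | succ rr ih =>
    intro t
    rw [List.replicate_succ, PySem.List.enumerate_cons, List.filterMap_cons,
      List.range_succ_eq_map, List.map_cons, List.map_map]
    simp only [ih (t+1), if_pos trivial]
    simp only [Nat.cast_zero, add_zero]
    congr 1
    apply List.map_congr_left
    intro k _
    simp only [Function.comp_apply]
    push_cast
    ring

theorem pv_cp (F B : List (Option (Int × String))) (r : Nat)
    (hF : ∀ x ∈ F, x ≠ none) (hB : ∀ x ∈ B, x ≠ none) :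
    (PySem.List.enumerate (F ++ List.replicate r none ++ B) 0).filterMap
      (fun p => if p.2 = (none : Option (Int × String)) then some p.1 else none)
    = (List.range r).map (fun u : Nat => (F.length : Int) + u) := by
  rw [PySem.List.enumerate_append, PySem.List.enumerate_append, List.filterMap_append,
    List.filterMap_append, pv_cp_some F 0 hF, pv_cp_rep r, pv_cp_some B _ hB]
  simp

theorem pv_foldl_min (t : List Int) : ∀ (x : Int), (∀ y ∈ t, x ≤ y) → t.foldl min x = x := by
  induction t with
  | nil => intro x _; rfl
  | cons y t ih =>
    intro x h
    simp only [List.foldl_cons]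
    rw [min_eq_left (h y (by simp))]
    exact ih x (fun z hz => h z (by simp [hz]))

theorem pv_foldl_max (t : List Int) : ∀ (x m : Int), x ≤ m → (∀ y ∈ t, y ≤ m) →
    (m = x ∨ m ∈ t) → t.foldl max x = m := by
  induction t with
  | nil => intro x m h1 _ h3; simp only [List.foldl_nil]; rcases h3 with h|h; omega; simp at h
  | cons y t ih =>
    intro x m h1 h2 h3
    simp only [List.foldl_cons]
    rcases h3 with h3 | h3
    · have hy : y ≤ x := h3 ▸ h2 y (by simp)
      rw [max_eq_left hy, h3]
      exact ih x x le_rfl (fun z hz => h3 ▸ h2 z (by simp [hz])) (Or.inl rfl)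
    · rcases List.mem_cons.mp h3 with h3 | h3
      · subst h3
        rw [max_eq_right h1]
        exact ih m m le_rfl (fun z hz => h2 z (by simp [hz])) (Or.inl rfl)
      · exact ih (max x y) m (max_le h1 (h2 y (by simp))) (fun z hz => h2 z (by simp [hz])) (Or.inr h3)

theorem pv_min_range (a : Int) (r : Nat) (hr : 1 ≤ r) :
    PySem.List.min? ((List.range r).map (fun u : Nat => a + (u:Int))) (fun x => x) = some a := by
  obtain ⟨rr, rfl⟩ : ∃ rr, r = rr + 1 := ⟨r - 1, by omega⟩
  rw [List.range_succ_eq_map, List.map_cons, List.map_map, PySem.List.min?_id_cons]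
  have h0 : a + ((0:Nat):Int) = a := by simp
  rw [h0]
  congr 1
  apply pv_foldl_min
  intro y hy
  simp only [List.mem_map, Function.comp] at hy
  obtain ⟨k, _, rfl⟩ := hy
  omega

theorem pv_max_range (a : Int) (r : Nat) (hr : 1 ≤ r) :
    PySem.List.max? ((List.range r).map (fun u : Nat => a + (u:Int))) (fun x => x)
      = some (a + r - 1) := by
  obtain ⟨rr, rfl⟩ : ∃ rr, r = rr + 1 := ⟨r - 1, by omega⟩
  rw [List.range_succ_eq_map, List.map_cons, List.map_map, PySem.List.max?_id_cons]
  have h0 : a + ((0:Nat):Int) = a := by simp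
  rw [h0]
  congr 1
  apply pv_foldl_max
  · push_cast; omega
  · intro y hy
    simp only [List.mem_map, Function.comp] at hy
    obtain ⟨k, hk, rfl⟩ := hy
    simp only [List.mem_range] at hk
    push_cast
    omega
  · rcases Nat.eq_zero_or_pos rr with h | h
    · left; subst h; push_cast; ring
    · right
      simp only [List.mem_map, Function.comp]
      refine ⟨rr - 1, by simp [List.mem_range]; omega, ?_⟩
      push_cast [h]
      omega

theorem pv_loop2 (cl cr : Int) (F B : List (Option (Int × String))) (r : Nat) : ∀ (j : Nat), j ≤ r →
    (PySem.List.pyRange 0 (j : Int) 1).foldl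
      (pvStep2 cl cr (F.length : Int) (B.length : Int) pvAz pvAz.reverse)
      (F ++ List.replicate r none ++ B, (F.length : Int), -1 - (B.length : Int))
    = (F ++ (pvLblF cl (j/2) ++ (List.replicate (r-j) none ++ (pvLblB cr ((j+1)/2) ++ B))),
       (F.length : Int) + ((j/2 : Nat) : Int), -1 - (B.length : Int) - (((j+1)/2 : Nat) : Int)) := by
  intro j
  induction j with
  | zero =>
    intro _
    simp [pvLblF, pvLblB, List.append_assoc]
  | succ j ih =>
    intro hj
    have hcast : (((j+1:Nat)) : Int) = (j:Int) + 1 := by push_cast; ring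
    rw [hcast, PySem.List.pyRange_one_succ_right (by omega), List.foldl_append,
      List.foldl_cons, List.foldl_nil, ih (by omega)]
    have hmod : PySem.Int.mod (j:Int) 2 = (j:Int) % 2 := PySem.Int.mod_eq_emod_of_pos (by omega)
    rcases Nat.even_or_odd j with he | ho
    · -- back write
      obtain ⟨c, rfl⟩ : ∃ c, j = c + c := he
      simp only [pvStep2, hmod]
      rw [if_pos (by omega)]
      have h1 : (c+c)/2 = c := by omega
      have h2 : (c+c+1)/2 = c := by omega
      have h3 : (c+c+1+1)/2 = c + 1 := by omega
      have h4 : r - (c+c) = (r - (c+c+1)) + 1 := by omega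
      have hlen : (F ++ (pvLblF cl ((c+c)/2) ++ (List.replicate (r-(c+c)) none ++ (pvLblB cr ((c+c+1)/2) ++ B)))).length
          = F.length + r + B.length := by simp; omega
      rw [pv_setD_neg _ _ _ (by rw [hlen]; push_cast; omega) (by push_cast; omega), hlen]
      simp only [Prod.mk.injEq]
      refine ⟨?_, by omega, by push_cast; omega⟩
      have hidx : (((F.length + r + B.length : Nat) : Int) + (-1 - (B.length:Int) - ((((c+c+1)/2 : Nat)):Int))).toNat
          = (F ++ (pvLblF cl ((c+c)/2) ++ List.replicate (r-(c+c+1)) none)).length := by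
        simp; omega
      have hval : (-1 - (B.length:Int) - ((((c+c+1)/2:Nat)):Int)) + (B.length:Int) = -1 - ((c:Int)) := by
        push_cast; omega
      rw [hval, pv_za_get c, hidx, h1, h2, h3, h4, List.replicate_succ', pvLblB_succ,
        show (F ++ (pvLblF cl c ++ ((List.replicate (r-(c+c+1)) none ++ [none]) ++ (pvLblB cr c ++ B))))
          = ((F ++ (pvLblF cl c ++ List.replicate (r-(c+c+1)) none)) ++ (none :: (pvLblB cr c ++ B))) by
            simp [List.append_assoc],
        pv_set_at _ _ _ _ (by simp)]
      simp [List.append_assoc]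
    · -- front write
      obtain ⟨c, rfl⟩ : ∃ c, j = 2*c+1 := ho
      simp only [pvStep2, hmod]
      rw [if_neg (by omega)]
      have h1 : (2*c+1)/2 = c := by omega
      have h2 : (2*c+1+1)/2 = c + 1 := by omega
      have h3 : (2*c+1+1+1)/2 = c + 1 := by omega
      have h4 : r - (2*c+1) = (r - (2*c+1+1)) + 1 := by omega
      have hval : ((F.length:Int) + (((2*c+1)/2 : Nat):Int)) - (F.length:Int) = ((c:Nat):Int) := by
        push_cast; omega
      rw [hval, pv_az_get c,
        PySem.List.pySetD_of_nonneg _ _ (by positivity)]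
      simp only [Prod.mk.injEq]
      refine ⟨?_, by push_cast; omega, by omega⟩
      have hidx : ((F.length:Int) + (((2*c+1)/2 : Nat):Int)).toNat
          = (F ++ pvLblF cl ((2*c+1)/2)).length := by simp; omega
      rw [hidx, h1, h2, h3, h4, List.replicate_succ, pvLblF_succ,
        show (F ++ (pvLblF cl c ++ ((none :: List.replicate (r-(2*c+1+1)) none) ++ (pvLblB cr (c+1) ++ B))))
          = ((F ++ pvLblF cl c) ++ (none :: (List.replicate (r-(2*c+1+1)) none ++ (pvLblB cr (c+1) ++ B)))) by
            simp [List.append_assoc],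
        pv_set_at _ _ _ _ (by simp)]
      simp [List.append_assoc]

theorem pv_loop2' (cl cr ff bf i2 i3 : Int) (F B : List (Option (Int × String))) (r j : Nat)
    (hj : j ≤ r) (hff : ff = (F.length : Int)) (hbf : bf = (B.length : Int))
    (h2 : i2 = (F.length : Int)) (h3 : i3 = -1 - (B.length : Int)) :
    (PySem.List.pyRange 0 (j : Int) 1).foldl (pvStep2 cl cr ff bf pvAz pvAz.reverse)
      (F ++ List.replicate r none ++ B, i2, i3)
    = (F ++ (pvLblF cl (j/2) ++ (List.replicate (r-j) none ++ (pvLblB cr ((j+1)/2) ++ B))),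
       (F.length : Int) + ((j/2 : Nat) : Int), -1 - (B.length : Int) - (((j+1)/2 : Nat) : Int)) := by
  subst hff hbf h2 h3
  exact pv_loop2 cl cr F B r j hj

theorem pv_label_eq (i : Nat) (h : i < 52) : pvAzAt i = pvLabel i := by
  revert h
  revert i
  decide

theorem pv_map_cell (cell : Int → Option (Int × String)) (a b : Int) (c : Nat) (hc : b - a = (c:Int))
    (g : Nat → Option (Int × String)) (h : ∀ u : Nat, u < c → cell (a + u) = g u) :
    (PySem.List.pyRange a b 1).map cell = (List.range c).map g := by
  rw [PySem.List.pyRange_one, List.map_map, hc, Int.toNat_natCast]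
  apply List.map_congr_left
  intro u hu
  simp only [Function.comp_apply]
  exact h u (List.mem_range.mp hu)
theorem pv_front_ne_none (s : Int) (c : Nat) : ∀ x ∈ pvFront s c, x ≠ none := by
  intro x hx
  simp only [pvFront, List.mem_map] at hx
  obtain ⟨j, _, rfl⟩ := hx
  simp

theorem pv_back_ne_none (e : Int) (c : Nat) : ∀ x ∈ pvBack e c, x ≠ none := by
  intro x hx
  simp only [pvBack, List.mem_map] at hx
  obtain ⟨j, _, rfl⟩ := hx
  simp

theorem pv_final_le (l m s e : Int) (n k : Nat) (h2 : 2 ≤ l) (hle : l ≤ m)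
    (hn : max l m = (n:Int)) (hk : min l m = (k:Int)) :
    get_imgt_cdr_alt l m s e
      = pvFront s ((k+1)/2) ++ List.replicate (n-k) none ++ pvBack e (k/2) := by
  have hsize : max (max l m) 0 = (n:Int) := by omega
  have hfc : PySem.Int.floordiv (min l m + 1) 2 = (((k+1)/2 : Nat) : Int) := by
    rw [PySem.Int.floordiv_eq_ediv_of_pos (by omega), hk]; omega
  have hbc : PySem.Int.floordiv (min l m) 2 = ((k/2 : Nat) : Int) := by
    rw [PySem.Int.floordiv_eq_ediv_of_pos (by omega), hk]; omega
  simp only [get_imgt_cdr_alt, if_neg (by omega : ¬ l ≤ 0), if_neg (by omega : ¬ l = 1), hsize]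
  rw [PySem.List.pyRange_one_append 0 ((n:Int) - ((k/2 : Nat):Int)) (n:Int) (by omega) (by omega),
    PySem.List.pyRange_one_append 0 ((((k+1)/2 : Nat)):Int) ((n:Int) - ((k/2 : Nat):Int)) (by omega) (by omega),
    List.map_append, List.map_append]
  have e1 : (PySem.List.pyRange 0 ((((k+1)/2 : Nat)):Int) 1).map (pvCell l m s e)
      = pvFront s ((k+1)/2) := by
    apply pv_map_cell _ _ _ _ (by omega)
    intro u hu
    simp only [pvCell, hsize, hfc, hbc]
    rw [if_pos (by omega)]
    congr 2
    omega
  have e2 : (PySem.List.pyRange ((((k+1)/2 : Nat)):Int) ((n:Int) - ((k/2 : Nat):Int)) 1).map (pvCell l m s e)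
      = List.replicate (n-k) none := by
    rw [pv_map_cell _ _ _ (n-k) (by omega) (fun _ => none)
      (by
        intro u hu
        simp only [pvCell, hsize, hfc, hbc]
        rw [if_neg (by omega), if_neg (by omega), if_pos (by omega)])]
    rw [List.map_const', List.length_range]
  have e3 : (PySem.List.pyRange ((n:Int) - ((k/2 : Nat):Int)) (n:Int) 1).map (pvCell l m s e)
      = pvBack e (k/2) := by
    apply pv_map_cell _ _ _ _ (by omega)
    intro u hu
    simp only [pvCell, hsize, hfc, hbc]
    rw [if_neg (by omega), if_pos (by omega)]
    congr 2
    omega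
  rw [e1, e2, e3]

theorem pv_final_gt (l m s e cl cr : Int) (n k r : Nat) (h2m : 2 ≤ m) (hgt : m < l)
    (h104 : l - m ≤ 104) (hn : max l m = (n:Int)) (hk : min l m = (k:Int)) (hr : l - m = (r:Int))
    (hcl : cl = s + ((((k+1)/2 - 1 : Nat)):Int)) (hcr : cr = e - ((k/2 : Nat):Int)) :
    get_imgt_cdr_alt l m s e
      = pvFront s ((k+1)/2) ++ (pvLblF cl (r/2)
          ++ (pvLblB cr ((r+1)/2) ++ pvBack e (k/2))) := by
  have hsize : max (max l m) 0 = (n:Int) := by omega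
  have hfc : PySem.Int.floordiv (min l m + 1) 2 = (((k+1)/2 : Nat) : Int) := by
    rw [PySem.Int.floordiv_eq_ediv_of_pos (by omega), hk]; omega
  have hbc : PySem.Int.floordiv (min l m) 2 = ((k/2 : Nat) : Int) := by
    rw [PySem.Int.floordiv_eq_ediv_of_pos (by omega), hk]; omega
  have hd2 : PySem.Int.floordiv (l - m) 2 = ((r/2 : Nat) : Int) := by
    rw [PySem.Int.floordiv_eq_ediv_of_pos (by omega), hr]; omega
  simp only [get_imgt_cdr_alt, if_neg (by omega : ¬ l ≤ 0), if_neg (by omega : ¬ l = 1), hsize]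
  rw [PySem.List.pyRange_one_append 0 ((((k+1)/2 : Nat)):Int) (n:Int) (by omega) (by omega),
    List.map_append,
    PySem.List.pyRange_one_append ((((k+1)/2 : Nat)):Int) ((((k+1)/2 + r/2 : Nat)):Int) (n:Int) (by omega) (by omega),
    List.map_append,
    PySem.List.pyRange_one_append ((((k+1)/2 + r/2 : Nat)):Int) ((n:Int) - ((k/2 : Nat):Int)) (n:Int) (by omega) (by omega),
    List.map_append]
  have e1 : (PySem.List.pyRange 0 ((((k+1)/2 : Nat)):Int) 1).map (pvCell l m s e)
      = pvFront s ((k+1)/2) := by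
    apply pv_map_cell _ _ _ _ (by omega)
    intro u hu
    simp only [pvCell, hsize, hfc, hbc]
    rw [if_pos (by omega)]
    congr 2
    omega
  have e2 : (PySem.List.pyRange ((((k+1)/2 : Nat)):Int) ((((k+1)/2 + r/2 : Nat)):Int) 1).map (pvCell l m s e)
      = pvLblF cl (r/2) := by
    apply pv_map_cell _ _ _ _ (by omega)
    intro u hu
    simp only [pvCell, hsize, hfc, hbc, hd2]
    rw [if_neg (by omega), if_neg (by omega), if_neg (by omega), if_pos (by omega)]
    rw [pv_label_eq u (by omega)]
    congr 2
    · omega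
    · congr 1
      omega
  have e3 : (PySem.List.pyRange ((((k+1)/2 + r/2 : Nat)):Int) ((n:Int) - ((k/2 : Nat):Int)) 1).map (pvCell l m s e)
      = pvLblB cr ((r+1)/2) := by
    apply pv_map_cell _ _ _ _ (by omega)
    intro u hu
    simp only [pvCell, hsize, hfc, hbc, hd2]
    rw [if_neg (by omega), if_neg (by omega), if_neg (by omega), if_neg (by omega)]
    rw [pv_label_eq ((r+1)/2 - 1 - u) (by omega)]
    congr 2
    · omega
    · congr 1
      omega
  have e4 : (PySem.List.pyRange ((n:Int) - ((k/2 : Nat):Int)) (n:Int) 1).map (pvCell l m s e)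
      = pvBack e (k/2) := by
    apply pv_map_cell _ _ _ _ (by omega)
    intro u hu
    simp only [pvCell, hsize, hfc, hbc]
    rw [if_neg (by omega), if_pos (by omega)]
    congr 2
    omega
  rw [e1, e2, e3, e4]

-- ===== VERDICT =====
theorem get_imgt_cdr_spec : Claim_equal_get_imgt_cdr := by
  intro l m s e _ hpre
  unfold Spec_get_imgt_cdr
  by_cases hl0 : l = 0
  · subst hl0
    simp only [get_imgt_cdr, get_imgt_cdr_alt]
    norm_num
  by_cases hl1 : l = 1
  · subst hl1
    simp only [get_imgt_cdr, get_imgt_cdr_alt]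
    norm_num
    rw [PySem.List.pySetD_of_nonneg _ _ (by omega)]
    have h1 : (max (1:Int) m).toNat = ((max 1 m).toNat - 1) + 1 := by omega
    rw [h1, List.replicate_succ]
    simp
  by_cases hlneg : l < 0
  · have hm0 : m ≤ 0 := by rcases hpre with h|h|h|h <;> omega
    have hmax : (max l m).toNat = 0 := by omega
    have hmin : PySem.List.pyRange 0 (min l m) 1 = [] := PySem.List.pyRange_one_eq_nil (by omega)
    simp only [get_imgt_cdr, get_imgt_cdr_alt, if_neg hl0, if_neg hl1,
      if_pos (by omega : l ≤ 0)]
    rw [pv_map_const, hmax, hmin]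
    norm_num
    omega
  -- main case: 2 ≤ l, 2 ≤ m, l - m ≤ 104
  have h2l : 2 ≤ l := by rcases hpre with h|h|h|h <;> omega
  have h2m : 2 ≤ m := by rcases hpre with h|h|h|h <;> omega
  have h104 : l - m ≤ 104 := by rcases hpre with h|h|h|h <;> omega
  obtain ⟨n, hn⟩ : ∃ n : Nat, max l m = (n:Int) := ⟨(max l m).toNat, by omega⟩
  obtain ⟨k, hk⟩ : ∃ k : Nat, min l m = (k:Int) := ⟨(min l m).toNat, by omega⟩
  have hk2 : 2 ≤ k := by omega
  have hkn : k ≤ n := by omega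
  have haz : PySem.List.slice pvAlphabet none (some (-1)) = pvAz := by
    rw [PySem.List.slice_to_neg_one]; rfl
  have hza : (PySem.List.slice? pvAz none none (-1)).getD [] = pvAz.reverse := by
    rw [PySem.List.slice?_none_none_neg_one]; rfl
  simp only [get_imgt_cdr, if_neg hl0, if_neg hl1, haz, hza, hn, hk, pv_map_const,
    Int.toNat_natCast]
  rw [pv_loop1 s e n k hkn]
  simp only
  rw [pv_cp _ _ _ (pv_front_ne_none s _) (pv_back_ne_none e _), pvFront_length]
  by_cases hlm : l = m
  · -- l = m : centrepoint empty, early return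
    have hnk : n - k = 0 := by omega
    rw [if_pos (by simp [hnk])]
    rw [pv_final_le l m s e n k h2l (by omega) hn hk]
  by_cases hlt : l < m
  · -- l < m : centrepoint non-empty but the second loop is empty
    rw [if_neg (by simp [List.map_eq_nil_iff, List.range_eq_nil]; omega)]
    have hb : PySem.List.pyRange 0 (max 0 (l - m)) 1 = [] :=
      PySem.List.pyRange_one_eq_nil (by omega)
    rw [hb, List.foldl_nil]
    rw [pv_final_le l m s e n k h2l (by omega) hn hk]
  -- m < l : the second loop fills the centre with labels
  have hgt : m < l := by omega
  have hrn : 1 ≤ n - k := by omega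
  rw [if_neg (by simp [List.map_eq_nil_iff, List.range_eq_nil]; omega)]
  rw [pv_min_range _ _ hrn, pv_max_range _ _ hrn]
  have hgl : PySem.List.pyGet?
      (pvFront s ((k+1)/2) ++ List.replicate (n-k) none ++ pvBack e (k/2))
      ((some ((((k+1)/2 : Nat)):Int)).getD 0 - 1)
      = some (some (s + ((((k+1)/2 - 1 : Nat)):Int), " ")) := by
    rw [Option.getD_some,
      show ((((k+1)/2 : Nat)):Int) - 1 = ((((k+1)/2 - 1 : Nat)):Int) by omega,
      PySem.List.pyGet?_natCast,
      List.getElem?_append_left (by simp; omega),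
      List.getElem?_append_left (by simp; omega)]
    simp only [pvFront, List.getElem?_map]
    rw [List.getElem?_range (by omega)]
    simp only [Option.map_some]
  have hgr : PySem.List.pyGet?
      (pvFront s ((k+1)/2) ++ List.replicate (n-k) none ++ pvBack e (k/2))
      ((some (((((k+1)/2 : Nat)):Int) + (((n-k : Nat)):Int) - 1)).getD 0 + 1)
      = some (some (e - ((k/2 : Nat):Int), " ")) := by
    rw [Option.getD_some,
      show (((((k+1)/2 : Nat)):Int) + (((n-k : Nat)):Int) - 1) + 1
        = ((((k+1)/2 + (n-k) : Nat)):Int) by push_cast; ring,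
      PySem.List.pyGet?_natCast,
      List.getElem?_append_right (by simp)]
    simp only [pvBack, List.getElem?_map, List.length_append, pvFront_length,
      List.length_replicate, Nat.sub_self]
    rw [List.getElem?_range (by omega)]
    norm_num
  simp only [hgl, hgr]
  have hmod2 : PySem.Int.mod m 2 = m % 2 := PySem.Int.mod_eq_emod_of_pos (by omega)
  have hdiv2 : PySem.Int.floordiv m 2 = m / 2 := PySem.Int.floordiv_eq_ediv_of_pos (by omega)
  have hm' : m = (k:Int) := by omega
  have hfb1 : (if PySem.Int.mod m 2 = 0 then (PySem.Int.floordiv m 2, PySem.Int.floordiv m 2)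
      else (PySem.Int.floordiv m 2 + 1, PySem.Int.floordiv m 2)).1 = (((k+1)/2 : Nat) : Int) := by
    rw [hmod2, hdiv2, hm']
    split_ifs with h <;> simp <;> omega
  have hfb2 : (if PySem.Int.mod m 2 = 0 then (PySem.Int.floordiv m 2, PySem.Int.floordiv m 2)
      else (PySem.Int.floordiv m 2 + 1, PySem.Int.floordiv m 2)).2 = ((k/2 : Nat) : Int) := by
    rw [hmod2, hdiv2, hm']
    split_ifs with h <;> simp
  rw [hfb1, hfb2]
  have hbmax : max 0 (l - m) = (((n-k : Nat)):Int) := by omega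
  rw [hbmax, pv_loop2' _ _ _ _ _ _ (pvFront s ((k+1)/2)) (pvBack e (k/2)) (n-k) (n-k)
    le_rfl (by simp) (by simp) (by simp) (by simp)]
  simp only [Nat.sub_self, List.replicate_zero, List.nil_append]
  rw [pv_final_gt l m s e _ _ n k (n-k) h2m hgt h104 hn hk (by omega) rfl rfl]
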